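-- pv_equiv track=rewrite | github.com/schir2/strandsPuzzleService | generator/board_generator.py | generate_region_length_combinations
-- ===== SOURCE A (Python) =====
-- from collections import defaultdict
-- from itertools import combinations
--
-- def generate_region_length_combinations(words):
--     # TODO This needs to generate the actual combinations of words
--     words = set(words)
--     total_length = sum(len(word) for word in words)
--     combinations_map = defaultdict(set)
--
--     for num_words in range(1, len(words)):
--         for combo in combinations(words, num_words):
--             combo_length = sum(len(word) for word in combo)
--             complementary_length = total_length - combo_length
--             if combo_length > 0 and complementary_length > 0:
--                 combo_tuple = tuple(sorted(combo))
--                 combo_complement_tuple = tuple(sorted(words - set(combo)))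
--                 combinations_map[(combo_length, complementary_length)].add((combo_tuple, combo_complement_tuple))
--                 combinations_map[(complementary_length, combo_length)].add((combo_complement_tuple, combo_tuple))
--     return combinations_map
-- ===== SOURCE B (Python) =====
-- from collections import defaultdict
--
--
-- def _split_k(wl, k):
--     """All (combo, complement, combo_length) with combo a k-subset of wl,
--     in index-lexicographic order; the complement keeps wl's order."""
--     if k == 0:
--         return [([], list(wl), 0)]
--     if not wl:
--         return []
--     x, rest = wl[0], wl[1:]
--     take = [([x] + c, d, len(x) + l) for c, d, l in _split_k(rest, k - 1)]
--     skip = [(c, [x] + d, l) for c, d, l in _split_k(rest, k)]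
--     return take + skip
--
--
-- def _orientations(combo, complement, combo_length, complementary_length):
--     """The two oriented, key-tagged records one split contributes."""
--     ct = tuple(sorted(combo))
--     cc = tuple(sorted(complement))
--     return [((combo_length, complementary_length), (ct, cc)),
--             ((complementary_length, combo_length), (cc, ct))]
--
--
-- def generate_region_length_combinations(words):
--     wl = list(set(words))
--     total_length = sum(len(word) for word in wl)
--     # stage 1: the flat stream of (key, value) insertion events
--     events = [ev
--               for num_words in range(1, len(wl))
--               for combo, complement, combo_length in _split_k(wl, num_words)
--               if 0 < combo_length < total_length
--               for ev in _orientations(combo, complement, combo_length,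
--                                       total_length - combo_length)]
--     # stage 2: one generic fold of the events into the map
--     combinations_map = defaultdict(set)
--     for key, pair in events:
--         combinations_map[key].add(pair)
--     return combinations_map
-- ===== Notes on version B (the rewrite author's own statement) =====
-- stated objective: alternative
-- what changed: Replaces itertools.combinations plus a per-combo set() difference and length re-summation with a recursive splitter that yields each k-subset together with its complement and length in one structural pass, flattened into a single stream of (key, value) insertion events that a separate generic fold replays into the defaultdict (staged passes instead of nested in-place updates).
import Mathlib
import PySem

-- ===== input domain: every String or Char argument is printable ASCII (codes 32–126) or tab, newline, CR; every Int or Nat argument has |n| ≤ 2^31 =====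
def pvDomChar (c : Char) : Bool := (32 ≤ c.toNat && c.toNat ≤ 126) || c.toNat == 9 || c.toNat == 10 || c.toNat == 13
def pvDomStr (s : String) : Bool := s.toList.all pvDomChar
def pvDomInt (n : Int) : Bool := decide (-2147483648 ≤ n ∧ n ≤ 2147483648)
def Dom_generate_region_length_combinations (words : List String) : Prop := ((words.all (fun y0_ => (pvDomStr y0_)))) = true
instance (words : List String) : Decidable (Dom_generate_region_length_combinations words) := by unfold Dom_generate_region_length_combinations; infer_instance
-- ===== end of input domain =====

-- B is an alternative decomposition: a recursive splitter yields each subset with its complement and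
-- length (no itertools.combinations, no per-combo set difference), flattened into one stream of
-- (key, value) insertion events that a single generic fold replays into the map; return-value
-- equivalence only (neither version mutates its argument).

-- sum(len(w) for w in l)
def pvSumLen (l : List String) : Int := (l.map (fun w => (PySem.Str.len w : Int))).sum

-- ===== PORT A =====
-- the body of A's inner loop: one combo ↦ two insertions into the defaultdict
def pvBodyA (wl : List String) (total : Int)
    (d : PySem.Dict (Int × Int) (PySem.Set (List String × List String))) (combo : List String) :
    PySem.Dict (Int × Int) (PySem.Set (List String × List String)) :=
  let combo_length := pvSumLen combo
  let complementary_length := total - combo_length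
  if combo_length > 0 ∧ complementary_length > 0 then
    let combo_tuple := PySem.List.sorted combo (fun x => x) false
    let combo_complement_tuple :=
      PySem.List.sorted (PySem.Set.diff wl (PySem.Set.ofList combo)) (fun x => x) false
    let d := d.insert (combo_length, complementary_length)
      (PySem.Set.add (d.getD (combo_length, complementary_length) PySem.Set.empty)
        (combo_tuple, combo_complement_tuple))
    d.insert (complementary_length, combo_length)
      (PySem.Set.add (d.getD (complementary_length, combo_length) PySem.Set.empty)
        (combo_complement_tuple, combo_tuple))
  else d

def generate_region_length_combinations (words : List String) :
    List (Int × Int × List (List String × List String)) :=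
  let wl : List String := PySem.Set.ofList words        -- words = set(words)
  let total_length := pvSumLen wl
  let d :=
    (PySem.List.pyRange 1 (wl.length : Int) 1).foldl
      (fun d num_words =>
        (PySem.List.combinations wl num_words.toNat).foldl (pvBodyA wl total_length) d)
      (PySem.Dict.mk [])
  d.items.map (fun p => (p.1.1, p.1.2, p.2))

-- ===== PORT B =====
-- _split_k: every (combo, complement, combo_length) with combo a k-subset, lexicographic order
def pvSplitK : List String → Nat → List (List String × List String × Int)
  | wl, 0 => [([], wl, 0)]
  | [], _ + 1 => []
  | x :: rest, k + 1 =>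
      (pvSplitK rest k).map (fun t => (x :: t.1, t.2.1, (PySem.Str.len x : Int) + t.2.2)) ++
      (pvSplitK rest (k + 1)).map (fun t => (t.1, x :: t.2.1, t.2.2))

-- _orientations: the two oriented, key-tagged records one split contributes
def pvOrientations (combo complement : List String) (combo_length complementary_length : Int) :
    List ((Int × Int) × (List String × List String)) :=
  let ct := PySem.List.sorted combo (fun x => x) false
  let cc := PySem.List.sorted complement (fun x => x) false
  [((combo_length, complementary_length), (ct, cc)),
   ((complementary_length, combo_length), (cc, ct))]

-- stage 2's loop body: combinations_map[key].add(pair)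
def pvPost (d : PySem.Dict (Int × Int) (PySem.Set (List String × List String)))
    (e : (Int × Int) × (List String × List String)) :
    PySem.Dict (Int × Int) (PySem.Set (List String × List String)) :=
  d.insert e.1 (PySem.Set.add (d.getD e.1 PySem.Set.empty) e.2)

def generate_region_length_combinations_alt (words : List String) :
    List (Int × Int × List (List String × List String)) :=
  let wl : List String := PySem.Set.ofList words        -- wl = list(set(words))
  let total_length := pvSumLen wl
  let events : List ((Int × Int) × (List String × List String)) :=
    (PySem.List.pyRange 1 (wl.length : Int) 1).flatMap (fun num_words =>
      ((pvSplitK wl num_words.toNat).filter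
          (fun t => decide (0 < t.2.2 ∧ t.2.2 < total_length))).flatMap (fun t =>
        pvOrientations t.1 t.2.1 t.2.2 (total_length - t.2.2)))
  ((events.foldl pvPost (PySem.Dict.mk [])).items).map (fun p => (p.1.1, p.1.2, p.2))

-- ===== PRECONDITION & SPEC =====
def Spec_generate_region_length_combinations (words : List String) (out : List (Int × Int × List (List String × List String))) : Prop := out = generate_region_length_combinations_alt words
instance (words : List String) (out : List (Int × Int × List (List String × List String))) : Decidable (Spec_generate_region_length_combinations words out) := by unfold Spec_generate_region_length_combinations; infer_instance

-- ===== CLAIM (what is proved, stated in full; the proofs are below) =====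
def Claim_equal_generate_region_length_combinations : Prop := ∀ (words : List String), Dom_generate_region_length_combinations words → Spec_generate_region_length_combinations words (generate_region_length_combinations words)

-- ===== LEMMAS AND PROOFS =====

-- the view of one combo that A's inner loop computes from scratch
def pvView (wl : List String) (c : List String) : List String × List String × Int :=
  (c, wl.filter (fun w => !(PySem.Set.ofList c).contains w), pvSumLen c)

lemma pvSplitK_eq (wl : List String) (h : wl.Nodup) :
    ∀ k, pvSplitK wl k = (PySem.List.combinations wl k).map (pvView wl) := by
  induction wl with
  | nil =>
    intro k
    cases k with
    | zero => simp [pvSplitK, PySem.List.combinations_zero, pvView, pvSumLen]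
    | succ k => simp [pvSplitK, PySem.List.combinations_nil_succ]
  | cons x rest ih =>
    have hx : x ∉ rest := (List.nodup_cons.1 h).1
    have hrest := (List.nodup_cons.1 h).2
    intro k
    cases k with
    | zero =>
      simp only [pvSplitK, PySem.List.combinations_zero, List.map_singleton, pvView, pvSumLen]
      simp [PySem.Set.ofList, PySem.Set.empty]
    | succ k =>
      rw [pvSplitK, PySem.List.combinations_cons_succ, ih hrest k, ih hrest (k + 1)]
      simp only [List.map_append, List.map_map]
      congr 1
      · apply List.map_congr_left
        intro c _
        simp only [Function.comp_apply, pvView]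
        have h2 : (x :: rest).filter (fun w => !(PySem.Set.ofList (x :: c)).contains w) =
            rest.filter (fun w => !(PySem.Set.ofList c).contains w) := by
          rw [List.filter_cons]
          have hcx : (PySem.Set.ofList (x :: c)).contains x = true := by
            simp [List.contains_eq_mem]
          rw [hcx]
          simp only [Bool.not_true, Bool.false_eq_true, if_false]
          apply List.filter_congr
          intro w hw
          have hwx : w ≠ x := fun e => hx (e ▸ hw)
          simp [List.contains_eq_mem, hwx]
        have h3 : pvSumLen (x :: c) = PySem.Str.len x + pvSumLen c := by simp [pvSumLen]
        rw [h2, h3]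
      · apply List.map_congr_left
        intro c hc
        have hsub : c.Sublist rest := PySem.List.sublist_of_mem_combinations hc
        have hxc : x ∉ c := fun hxm => hx (hsub.subset hxm)
        simp only [Function.comp_apply, pvView]
        have h2 : (x :: rest).filter (fun w => !(PySem.Set.ofList c).contains w) =
            x :: rest.filter (fun w => !(PySem.Set.ofList c).contains w) := by
          rw [List.filter_cons]
          have hcx : (PySem.Set.ofList c).contains x = false := by
            simp [List.contains_eq_mem, hxc]
          rw [hcx]
          simp
        rw [h2]

-- folding pvPost over a flatMap of event groups = folding the group fold
lemma foldl_pvPost_flatMap {α : Type} (g : α → List ((Int × Int) × (List String × List String)))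
    (l : List α) (d : PySem.Dict (Int × Int) (PySem.Set (List String × List String))) :
    (l.flatMap g).foldl pvPost d = l.foldl (fun d x => (g x).foldl pvPost d) d := by
  induction l generalizing d with
  | nil => rfl
  | cons x xs ih => simp [List.flatMap_cons, List.foldl_append, ih]

-- folding pvPost over the events of the filtered splits, one split at a time
lemma foldl_pvPost_filter_flatMap {α : Type} (p : α → Bool)
    (g : α → List ((Int × Int) × (List String × List String)))
    (l : List α) (d : PySem.Dict (Int × Int) (PySem.Set (List String × List String))) :
    ((l.filter p).flatMap g).foldl pvPost d
      = l.foldl (fun d x => ((if p x then g x else []) : List _).foldl pvPost d) d := by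
  induction l generalizing d with
  | nil => rfl
  | cons x xs ih =>
    by_cases hx : p x
    · simp [hx, List.flatMap_cons, List.foldl_append, ih]
    · simp [hx, ih]

-- replaying the events of one split equals A's loop body on the corresponding combo
lemma events_eq_bodyA (wl : List String) (total : Int)
    (d : PySem.Dict (Int × Int) (PySem.Set (List String × List String))) (c : List String) :
    (((if decide (0 < (pvView wl c).2.2 ∧ (pvView wl c).2.2 < total) then
          pvOrientations (pvView wl c).1 (pvView wl c).2.1 (pvView wl c).2.2
            (total - (pvView wl c).2.2)
        else []) : List ((Int × Int) × (List String × List String))).foldl pvPost d)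
      = pvBodyA wl total d c := by
  by_cases hg : 0 < pvSumLen c ∧ pvSumLen c < total
  · simp [pvBodyA, pvOrientations, pvView, pvPost, PySem.Set.diff, hg]
  · simp [pvView, pvBodyA, hg]

-- ===== VERDICT (by name: the statement is the Claim_ definition above) =====
theorem generate_region_length_combinations_spec : Claim_equal_generate_region_length_combinations := by
  intro words _
  show generate_region_length_combinations words = generate_region_length_combinations_alt words
  unfold generate_region_length_combinations generate_region_length_combinations_alt
  have hnd : (PySem.Set.ofList words).Nodup := PySem.Set.nodup_ofList words
  dsimp only
  congr 2
  rw [foldl_pvPost_flatMap]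
  apply PySem.List.foldl_congr_mem
  intro d k _
  rw [foldl_pvPost_filter_flatMap, pvSplitK_eq _ hnd, List.foldl_map]
  apply PySem.List.foldl_congr_mem
  intro d' c _
  exact (events_eq_bodyA _ _ _ _).symm
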